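-- pv_equiv track=rewrite | github.com/matheuscordeiro/Codility | Lessons/Leader/Dominator/solution2.py | solution
-- ===== SOURCE A (Python) =====
-- def solution(A):
-- 	size_A = len(A)
-- 	if not size_A:
-- 		return -1
-- 	sort_A = sorted(A)
-- 	count = 0
-- 	dominator = sort_A[size_A // 2]
-- 	index_dominator = -1
-- 	for i,a in enumerate(A):
-- 		if a == dominator:
-- 			count += 1
-- 			index_dominator = i
--
-- 	if count > size_A // 2:
-- 		return index_dominator
-- 	else:
-- 		return -1
-- ===== SOURCE B (Python) =====
-- def solution(A):
--     # Boyer-Moore majority vote: no sorting.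
--     cand = None
--     cnt = 0
--     for a in A:
--         if cnt == 0:
--             cand = a
--             cnt = 1
--         elif a == cand:
--             cnt += 1
--         else:
--             cnt -= 1
--     if cand is None:
--         return -1
--     total = 0
--     last = -1
--     for i, a in enumerate(A):
--         if a == cand:
--             total += 1
--             last = i
--     return last if total > len(A) // 2 else -1
-- ===== Notes on version B (the rewrite author's own statement) =====
-- stated objective: alternative
-- what changed: Replaces the sort-and-take-median candidate selection with a single-pass Boyer-Moore majority vote followed by the same verification count.
import Mathlib
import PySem

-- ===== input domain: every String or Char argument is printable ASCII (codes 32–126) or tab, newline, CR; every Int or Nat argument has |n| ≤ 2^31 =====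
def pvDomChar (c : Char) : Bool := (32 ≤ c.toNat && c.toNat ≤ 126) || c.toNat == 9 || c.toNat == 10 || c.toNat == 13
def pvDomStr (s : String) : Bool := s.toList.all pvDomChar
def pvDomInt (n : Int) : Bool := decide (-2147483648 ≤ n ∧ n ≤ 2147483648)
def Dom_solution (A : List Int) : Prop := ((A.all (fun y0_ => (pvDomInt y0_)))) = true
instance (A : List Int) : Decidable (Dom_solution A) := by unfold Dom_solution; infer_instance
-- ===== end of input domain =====

-- B replaces A's sort-and-median candidate selection by a one-pass Boyer-Moore
-- majority vote; the verification count is unchanged.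


-- ===== PORT A =====
-- the 'for i,a in enumerate(A): if a == dominator: count += 1; index_dominator = i'
-- loop, shared verbatim by both Pythons (A's verification loop and B's second pass)
def countLast (d : Int) (A : List Int) : Int × Int :=
  (PySem.List.enumerate A 0).foldl
    (fun (s : Int × Int) p => if p.2 = d then (s.1 + 1, p.1) else s) (0, -1)

def solution (A : List Int) : Int :=
  let size_A : Int := A.length
  if size_A = 0 then -1
  else
    let sort_A := PySem.List.sorted A (fun x => x) false
    -- index size_A // 2 is always in range (0 ≤ n/2 < n for n ≥ 1), so pyGetD is exact
    let dominator := PySem.List.pyGetD sort_A (PySem.Int.floordiv size_A 2) 0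
    let r := countLast dominator A
    if r.1 > PySem.Int.floordiv size_A 2 then r.2 else -1

-- ===== PORT B =====
-- one step of the Boyer-Moore vote loop ('if cnt == 0: … elif a == cand: … else: …')
def bmStep (s : Option Int × Int) (a : Int) : Option Int × Int :=
  if s.2 = 0 then (some a, 1)
  else if some a = s.1 then (s.1, s.2 + 1)
  else (s.1, s.2 - 1)

def solution_alt (A : List Int) : Int :=
  let bm := A.foldl bmStep (none, 0)
  match bm.1 with
  | none => -1
  | some cand =>
    let r := countLast cand A
    if r.1 > PySem.Int.floordiv (A.length : Int) 2 then r.2 else -1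

-- ===== PRECONDITION & SPEC =====
def Spec_solution (A : List Int) (out : Int) : Prop := out = solution_alt A
instance (A : List Int) (out : Int) : Decidable (Spec_solution A out) := by unfold Spec_solution; infer_instance

-- ===== CLAIM (what is proved, stated in full; the proofs are below) =====
def Claim_equal_solution : Prop := ∀ (A : List Int), Dom_solution A → Spec_solution A (solution A)

-- ===== LEMMAS AND PROOFS =====

-- the first component of the shared verification loop is the plain count
theorem countLast_fst (d : Int) (A : List Int) : (countLast d A).1 = (A.count d : Int) := by
  suffices h : ∀ (l : List Int) (s c j : Int),
      ((PySem.List.enumerate l s).foldl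
        (fun (st : Int × Int) p => if p.2 = d then (st.1 + 1, p.1) else st) (c, j)).1
        = c + (l.count d : Int) by
    simpa using h A 0 0 (-1)
  intro l
  induction l with
  | nil => intro s c j; simp [PySem.List.enumerate]
  | cons a t ih =>
    intro s c j
    rw [PySem.List.enumerate_cons]
    by_cases ha : a = d
    · simp only [List.foldl_cons, ha]
      rw [ih]
      simp
      omega
    · simp only [List.foldl_cons, if_neg ha]
      rw [ih]
      simp [ha]

-- Python's 'count > n // 2' as the arithmetic majority condition
theorem majority_cond (c n : Nat) :
    ((c : Int) > PySem.Int.floordiv (n : Int) 2) ↔ 2 * c > n := by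
  have h : PySem.Int.floordiv (n : Int) 2 = ((n / 2 : Nat) : Int) := by
    exact_mod_cast PySem.Int.floordiv_natCast n 2
  rw [h]
  omega

-- Boyer-Moore invariant over the processed prefix p
def BMInv (p : List Int) (s : Option Int × Int) : Prop :=
  0 ≤ s.2 ∧
  (∀ x : Int, s.1 ≠ some x → 2 * (p.count x : Int) + s.2 ≤ (p.length : Int)) ∧
  (∀ x : Int, s.1 = some x → 2 * (p.count x : Int) ≤ (p.length : Int) + s.2)

theorem bmInv_step (p : List Int) (s : Option Int × Int) (a : Int)
    (h : BMInv p s) : BMInv (p ++ [a]) (bmStep s a) := by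
  obtain ⟨cand, cnt⟩ := s
  obtain ⟨h1, h2, h3⟩ := h
  simp only at h1 h2 h3
  have hcnt : ∀ x : Int, 2 * (p.count x : Int) ≤ (p.length : Int) + cnt := by
    intro x
    by_cases hx : cand = some x
    · exact h3 x hx
    · have := h2 x hx; omega
  unfold BMInv bmStep
  split_ifs with hz he
  · -- cnt = 0 : restart with (some a, 1)
    refine ⟨by norm_num, ?_, ?_⟩
    · intro x hx
      replace hx : ¬ (some a = some x) := hx
      have hxa : ¬ (a = x) := fun hh => hx (by rw [hh])
      have := hcnt x
      simp [List.count_append, hxa]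
      omega
    · intro x hx
      replace hx : some a = some x := hx
      obtain rfl : a = x := Option.some.inj hx
      have := hcnt a
      simp [List.count_append]
      omega
  · -- a matches the candidate : (cand, cnt + 1)
    replace hz : ¬ cnt = 0 := hz
    replace he : some a = cand := he
    refine ⟨by simp only; omega, ?_, ?_⟩
    · intro x hx
      replace hx : cand ≠ some x := hx
      have hxa : ¬ (a = x) := fun hh => hx (by rw [← he, hh])
      have := h2 x hx
      simp [List.count_append, hxa]
      omega
    · intro x hx
      replace hx : cand = some x := hx
      obtain rfl : a = x := by rw [hx] at he; exact Option.some.inj he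
      have := h3 a hx
      simp [List.count_append]
      omega
  · -- a differs from the candidate : (cand, cnt - 1)
    replace hz : ¬ cnt = 0 := hz
    replace he : ¬ some a = cand := he
    refine ⟨by simp only; omega, ?_, ?_⟩
    · intro x hx
      replace hx : cand ≠ some x := hx
      have := h2 x hx
      by_cases hxa : a = x
      · simp [List.count_append, hxa]
        omega
      · simp [List.count_append, hxa]
        omega
    · intro x hx
      replace hx : cand = some x := hx
      have hxa : ¬ (a = x) := fun hh => he (by rw [hh, hx])
      have := h3 x hx
      simp [List.count_append, hxa]
      omega

theorem bmInv_foldl (l : List Int) : ∀ (p : List Int) (s : Option Int × Int),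
    BMInv p s → BMInv (p ++ l) (l.foldl bmStep s) := by
  induction l with
  | nil => intro p s h; simpa using h
  | cons a t ih =>
    intro p s h
    have := ih (p ++ [a]) (bmStep s a) (bmInv_step p s a h)
    simpa using this

-- if a majority element exists, the vote loop ends with it as candidate
theorem bm_finds_majority (A : List Int) (m : Int) (hm : 2 * A.count m > A.length) :
    (A.foldl bmStep (none, 0)).1 = some m := by
  have h0 : BMInv [] ((none : Option Int), (0 : Int)) := by
    refine ⟨le_refl 0, ?_, ?_⟩ <;> simp
  have h := bmInv_foldl A [] (none, 0) h0
  simp only [List.nil_append] at h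
  obtain ⟨h1, h2, _⟩ := h
  by_contra hne
  have := h2 m hne
  omega

-- in a (≤)-sorted list a majority element sits at the middle index
theorem sorted_middle_eq_majority (s : List Int) (m : Int)
    (hpw : s.Pairwise (· ≤ ·)) (hm : 2 * s.count m > s.length) :
    ∀ (h : s.length / 2 < s.length), s[s.length / 2] = m := by
  intro h
  set n := s.length with hn
  set i := n / 2 with hi
  have hmono := List.pairwise_iff_getElem.mp hpw
  rcases lt_trichotomy s[i] m with hlt | heq | hgt
  · -- everything in take (i+1) is ≤ s[i] < m
    exfalso
    have htake : (s.take (i+1)).count m = 0 := by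
      rw [List.count_eq_zero]
      intro hmem
      obtain ⟨k, hk, hkx⟩ := List.mem_iff_getElem.mp hmem
      rw [List.getElem_take] at hkx
      have hk1 : k < i + 1 := by
        have := hk; simp [List.length_take] at this; omega
      rcases Nat.lt_or_ge k i with hki | hki
      · have := hmono k i (by omega) h hki
        rw [hkx] at this; omega
      · have : k = i := by omega
        subst this; rw [hkx] at hlt; omega
    have hsplit : s.count m = (s.take (i+1)).count m + (s.drop (i+1)).count m := by
      conv_lhs => rw [← List.take_append_drop (i+1) s]
      exact List.count_append ..
    have hdrop : (s.drop (i+1)).count m ≤ n - (i+1) := by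
      have := List.count_le_length (l := s.drop (i+1)) (a := m)
      simpa using this
    omega
  · exact heq
  · -- everything in drop i is ≥ s[i] > m
    exfalso
    have hdrop : (s.drop i).count m = 0 := by
      rw [List.count_eq_zero]
      intro hmem
      obtain ⟨k, hk, hkx⟩ := List.mem_iff_getElem.mp hmem
      have hk' : i + k < n := by simp at hk; omega
      rw [List.getElem_drop] at hkx
      rcases Nat.eq_zero_or_pos k with hk0 | hk0
      · subst hk0; simp at hkx; rw [hkx] at hgt; omega
      · have := hmono i (i + k) h hk' (by omega)
        rw [hkx] at this; omega
    have hsplit : s.count m = (s.take i).count m + (s.drop i).count m := by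
      conv_lhs => rw [← List.take_append_drop i s]
      exact List.count_append ..
    have htake : (s.take i).count m ≤ i := by
      have := List.count_le_length (l := s.take i) (a := m)
      have hl : (s.take i).length ≤ i := by simp
      omega
    omega

-- A's sorted-median candidate IS the majority element when one exists
theorem median_eq_majority (A : List Int) (m : Int) (hm : 2 * A.count m > A.length) :
    PySem.List.pyGetD (PySem.List.sorted A (fun x => x) false)
      (PySem.Int.floordiv (A.length : Int) 2) 0 = m := by
  set s := PySem.List.sorted A (fun x => x) false with hs
  have hperm : s.Perm A := PySem.List.sorted_perm ..
  have hlen : s.length = A.length := hperm.length_eq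
  have hcnt : s.count m = A.count m := hperm.count_eq m
  have hpw : s.Pairwise (· ≤ ·) := by
    simpa using PySem.List.sorted_pairwise (xs := A) (key := fun x => x)
  have hms : 2 * s.count m > s.length := by omega
  have hpos : 0 < A.length := by
    have := List.count_le_length (l := A) (a := m); omega
  have hfd : PySem.Int.floordiv (A.length : Int) 2 = ((A.length / 2 : Nat) : Int) := by
    exact_mod_cast PySem.Int.floordiv_natCast A.length 2
  rw [hfd]
  have hrange : A.length / 2 < s.length := by omega
  have hmid := sorted_middle_eq_majority s m hpw hms (by omega)
  rw [PySem.List.pyGetD_natCast]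
  rw [List.getD_eq_getElem s 0 (by omega)]
  convert hmid using 2
  omega

-- ===== VERDICT (by name: the statement is the Claim_ definition above) =====
theorem solution_spec : Claim_equal_solution := by
  intro A _
  unfold Spec_solution solution solution_alt
  by_cases hnil : A = []
  · subst hnil; rfl
  · have hne : (A.length : Int) ≠ 0 := by
      simp [List.length_eq_zero_iff, hnil]
    simp only [if_neg hne]
    by_cases hmaj : ∃ m : Int, 2 * A.count m > A.length
    · obtain ⟨m, hm⟩ := hmaj
      rw [median_eq_majority A m hm, bm_finds_majority A m hm]
    · push Not at hmaj
      -- no majority: both branches return -1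
      have hA : ∀ d : Int, ¬ ((countLast d A).1 > PySem.Int.floordiv (A.length : Int) 2) := by
        intro d
        rw [countLast_fst, majority_cond]
        exact Nat.not_lt.mpr (hmaj d)
      rw [if_neg (hA _)]
      cases hbm : (A.foldl bmStep (none, 0)).1 with
      | none => rfl
      | some cand => simp only [if_neg (hA cand)]
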